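-- pv_equiv track=rewrite | github.com/769585073/AttackVulDetector | Attack/AttackTarget.py | token_in_line
-- ===== SOURCE A (Python) =====
-- def token_in_line(token_index, token_sequences, s_lengths):
--     '''
--     obtain the statement and the number of line of code, to which the token_i belong
--     :param token_index:
--     :param token_sequences:
--     :param s_lengths:
--     :return:
--     '''
--     sum_len=0
--     for line_num, len in enumerate(s_lengths):
--         start_index=sum_len
--         sum_len+=len
--         if token_index<sum_len and token_index>=start_index:
--             token_line_index=token_index-start_index # token index in the line, to which the token_i belong
--             return token_sequences[start_index:sum_len], line_num, token_line_index
-- ===== SOURCE B (Python) =====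
-- def token_in_line(token_index, token_sequences, s_lengths):
--     # staged: cumulative-end array, start array, candidate-line set, min-selection, one slice
--     ends = []
--     total = 0
--     for length in s_lengths:
--         total += length
--         ends.append(total)
--     starts = [0] + ends[:-1]
--     hits = [i for i in range(len(ends)) if starts[i] <= token_index < ends[i]]
--     if not hits:
--         return None
--     i = min(hits)
--     return token_sequences[starts[i]:ends[i]], i, token_index - starts[i]
-- ===== Notes on version B (the rewrite author's own statement) =====
-- stated objective: alternative
-- what changed: replaces A's fused early-return scan carrying a running sum by staged passes: build the cumulative end/start arrays, collect all candidate line indices by a range comprehension, select the line with min, then slice once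
import Mathlib
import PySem

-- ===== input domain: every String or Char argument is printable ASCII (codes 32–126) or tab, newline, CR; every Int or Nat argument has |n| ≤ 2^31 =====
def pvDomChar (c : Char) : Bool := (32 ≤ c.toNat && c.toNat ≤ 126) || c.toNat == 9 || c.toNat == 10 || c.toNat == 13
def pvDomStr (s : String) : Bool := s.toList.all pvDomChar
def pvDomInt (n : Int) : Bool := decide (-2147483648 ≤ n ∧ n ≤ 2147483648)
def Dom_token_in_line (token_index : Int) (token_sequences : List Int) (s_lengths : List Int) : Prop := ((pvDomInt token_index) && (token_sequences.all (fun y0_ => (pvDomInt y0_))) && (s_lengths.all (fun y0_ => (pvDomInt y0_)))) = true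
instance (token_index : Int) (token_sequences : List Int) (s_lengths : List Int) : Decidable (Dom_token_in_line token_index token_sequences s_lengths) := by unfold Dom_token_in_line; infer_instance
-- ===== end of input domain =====

-- B stages the work (cumulative end/start arrays, a filtered candidate-index list, min-selection, one slice) instead of A's fused early-return scan; alternative decomposition, same cost.


-- ===== PORT A =====
-- the 'for line_num, len in enumerate(s_lengths)' loop with early return, carrying sum_len
def tokenInLineLoopA (token_index : Int) (token_sequences : List Int)
    (sum_len line_num : Int) (lens : List Int) : Option (List Int × Int × Int) :=
  match lens with
  | [] => none
  | len :: rest =>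
    let start_index := sum_len
    let sum_len' := sum_len + len
    if token_index < sum_len' ∧ token_index ≥ start_index then
      some (PySem.List.slice token_sequences (some start_index) (some sum_len'), line_num,
            token_index - start_index)
    else
      tokenInLineLoopA token_index token_sequences sum_len' (line_num + 1) rest

def token_in_line (token_index : Int) (token_sequences : List Int) (s_lengths : List Int) : Option (List Int × Int × Int) :=
  tokenInLineLoopA token_index token_sequences 0 0 s_lengths

-- ===== PORT B =====
-- pass 1 of Source B: the cumulative end-offset array (total += length; ends.append(total))
def buildEndsB (s_lengths : List Int) : List Int :=
  (s_lengths.foldl (fun (acc : List Int × Int) length =>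
      (acc.1 ++ [acc.2 + length], acc.2 + length)) ([], 0)).1

-- Source B: starts = [0] + ends[:-1]; hits = [i for i in range(len(ends)) if starts[i] <= t < ends[i]];
-- starts[i]/ends[i] are in range for every i range(len(ends)) yields, so pyGetD _ _ 0 is exact there
def token_in_line_alt (token_index : Int) (token_sequences : List Int) (s_lengths : List Int) : Option (List Int × Int × Int) :=
  let ends := buildEndsB s_lengths
  let starts := 0 :: PySem.List.slice ends none (some (-1))
  let hits := (PySem.List.pyRange 0 (ends.length : Int) 1).filter
      (fun i => decide (PySem.List.pyGetD starts i 0 ≤ token_index ∧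
                        token_index < PySem.List.pyGetD ends i 0))
  if hits = [] then none
  else
    let i := (PySem.List.min? hits (fun x => x)).getD 0
    some (PySem.List.slice token_sequences (some (PySem.List.pyGetD starts i 0))
            (some (PySem.List.pyGetD ends i 0)),
          i, token_index - PySem.List.pyGetD starts i 0)

-- ===== PRECONDITION & SPEC =====
def Spec_token_in_line (token_index : Int) (token_sequences : List Int) (s_lengths : List Int) (out : Option (List Int × Int × Int)) : Prop := out = token_in_line_alt token_index token_sequences s_lengths
instance (token_index : Int) (token_sequences : List Int) (s_lengths : List Int) (out : Option (List Int × Int × Int)) : Decidable (Spec_token_in_line token_index token_sequences s_lengths out) := by unfold Spec_token_in_line; infer_instance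

-- ===== CLAIM (what is proved, stated in full; the proofs are below) =====
def Claim_equal_token_in_line : Prop := ∀ (token_index : Int) (token_sequences : List Int) (s_lengths : List Int), Dom_token_in_line token_index token_sequences s_lengths → Spec_token_in_line token_index token_sequences s_lengths (token_in_line token_index token_sequences s_lengths)

-- ===== LEMMAS AND PROOFS =====

-- the list of prefix sums starting from `total`
def pfxL (total : Int) : List Int → List Int
  | [] => []
  | l :: ls => (total + l) :: pfxL (total + l) ls

theorem foldl_pfx (lens : List Int) : ∀ (acc : List Int) (total : Int),
    (lens.foldl (fun (acc : List Int × Int) length =>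
        (acc.1 ++ [acc.2 + length], acc.2 + length)) (acc, total)).1 = acc ++ pfxL total lens := by
  induction lens with
  | nil => intro acc total; simp [pfxL]
  | cons l ls ih =>
    intro acc total
    simp only [List.foldl_cons, pfxL]
    rw [ih]
    simp

theorem buildEndsB_eq (lens : List Int) : buildEndsB lens = pfxL 0 lens := by
  unfold buildEndsB
  simpa using foldl_pfx lens [] 0

theorem pfxL_length : ∀ (lens : List Int) (total : Int), (pfxL total lens).length = lens.length := by
  intro lens
  induction lens with
  | nil => intro _; rfl
  | cons l ls ih => intro total; simp [pfxL, ih]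

theorem pfxL_getD : ∀ (lens : List Int) (total : Int) (j : Nat), j < lens.length →
    (pfxL total lens).getD j 0 = total + (lens.take (j + 1)).sum := by
  intro lens
  induction lens with
  | nil => intro _ j h; simp at h
  | cons l ls ih =>
    intro total j h
    cases j with
    | zero => simp [pfxL]
    | succ j' =>
      simp only [pfxL, List.getD_cons_succ, List.take_succ_cons, List.sum_cons]
      rw [ih (total + l) j' (by simpa using h)]
      ring

theorem starts_getD (lens : List Int) (k : Nat) (hk : k < lens.length) :
    (0 :: (pfxL 0 lens).dropLast).getD k 0 = (lens.take k).sum := by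
  cases k with
  | zero => simp
  | succ j =>
    have hlen := pfxL_length lens 0
    have hj : j < (pfxL 0 lens).dropLast.length := by
      simp [List.length_dropLast, hlen]; omega
    rw [List.getD_cons_succ, List.getD_eq_getElem _ 0 hj, List.getElem_dropLast,
        ← List.getD_eq_getElem _ 0 (by simp at hj ⊢; omega), pfxL_getD lens 0 j (by omega)]
    ring

-- A's loop misses every interval iff no index satisfies the containment condition
theorem loopA_none' (t : Int) (seq : List Int) : ∀ (lens : List Int) (sum ln : Int),
    (∀ j : Nat, j < lens.length →
      ¬(sum + (lens.take j).sum ≤ t ∧ t < sum + (lens.take (j + 1)).sum)) →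
    tokenInLineLoopA t seq sum ln lens = none := by
  intro lens
  induction lens with
  | nil => intro _ _ _; rfl
  | cons l ls ih =>
    intro sum ln hmiss
    have h0 := hmiss 0 (by simp)
    simp only [List.take_zero, List.sum_nil, List.take_succ_cons, List.sum_cons] at h0
    simp only [tokenInLineLoopA]
    rw [if_neg (by simp at h0 ⊢; omega)]
    refine ih (sum + l) (ln + 1) (fun j hj => ?_)
    have := hmiss (j + 1) (by simpa using hj)
    simp only [List.take_succ_cons, List.sum_cons] at this
    intro hc
    exact this ⟨by omega, by omega⟩

-- A's loop returns the interval of the FIRST index satisfying the containment condition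
theorem loopA_hit' (t : Int) (seq : List Int) : ∀ (lens : List Int) (sum ln : Int) (r : Nat),
    r < lens.length →
    (∀ j : Nat, j < r →
      ¬(sum + (lens.take j).sum ≤ t ∧ t < sum + (lens.take (j + 1)).sum)) →
    sum + (lens.take r).sum ≤ t → t < sum + (lens.take (r + 1)).sum →
    tokenInLineLoopA t seq sum ln lens =
      some (PySem.List.slice seq (some (sum + (lens.take r).sum))
              (some (sum + (lens.take (r + 1)).sum)),
            ln + (r : Int), t - (sum + (lens.take r).sum)) := by
  intro lens
  induction lens with
  | nil => intro _ _ r hr _; simp at hr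
  | cons l ls ih =>
    intro sum ln r hr hmiss hlo hhi
    cases r with
    | zero =>
      simp only [List.take_zero, List.sum_nil, add_zero] at hlo
      simp only [List.take_succ_cons, List.take_zero, List.sum_cons, List.sum_nil, add_zero] at hhi
      simp only [tokenInLineLoopA]
      rw [if_pos (by omega)]
      simp
    | succ r' =>
      have h0 := hmiss 0 (by omega)
      simp only [List.take_zero, List.sum_nil, List.take_succ_cons, List.sum_cons] at h0
      simp only [List.take_succ_cons, List.sum_cons] at hlo hhi
      simp only [tokenInLineLoopA]
      rw [if_neg (by simp at h0 ⊢; omega)]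
      have hrec := ih (sum + l) (ln + 1) r' (by simpa using hr)
        (fun j hj => by
          have := hmiss (j + 1) (by omega)
          simp only [List.take_succ_cons, List.sum_cons] at this
          intro hc
          exact this ⟨by omega, by omega⟩)
        (by omega) (by omega)
      rw [hrec]
      simp only [List.take_succ_cons, List.sum_cons]
      rw [show sum + l + (List.take r' ls).sum = sum + (l + (List.take r' ls).sum) from by ring,
          show sum + l + (List.take (r' + 1) ls).sum = sum + (l + (List.take (r' + 1) ls).sum) from by ring]
      push_cast
      rw [show ln + 1 + (r' : Int) = ln + ((r' : Int) + 1) from by ring]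

-- min over a list whose elements all dominate the accumulator
theorem foldl_min_of_le (x : Int) : ∀ (l : List Int), (∀ y ∈ l, x ≤ y) → l.foldl min x = x := by
  intro l
  induction l with
  | nil => intro _; rfl
  | cons y ys ih =>
    intro h
    simp only [List.foldl_cons]
    rw [min_eq_left (h y (List.mem_cons_self ..))]
    exact ih (fun z hz => h z (List.mem_cons_of_mem _ hz))

-- B's candidate list, rewritten over List.range with the take-sum containment predicate
theorem hits_eq (t : Int) (lens : List Int) :
    (PySem.List.pyRange 0 ((pfxL 0 lens).length : Int) 1).filter
        (fun i => decide (PySem.List.pyGetD (0 :: PySem.List.slice (pfxL 0 lens) none (some (-1))) i 0 ≤ t ∧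
                          t < PySem.List.pyGetD (pfxL 0 lens) i 0)) =
      ((List.range lens.length).filter
        (fun k => decide ((lens.take k).sum ≤ t ∧ t < (lens.take (k + 1)).sum))).map
        (fun (k : Nat) => (k : Int)) := by
  rw [PySem.List.slice_to_neg_one, pfxL_length, PySem.List.pyRange_one]
  simp only [sub_zero, Int.toNat_natCast, zero_add]
  rw [List.filter_map]
  congr 1
  apply List.filter_congr
  intro k hk
  have hkn : k < lens.length := List.mem_range.mp hk
  simp only [Function.comp_apply, PySem.List.pyGetD_natCast]
  rw [starts_getD lens k hkn, pfxL_getD lens 0 k hkn]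
  simp

-- ===== VERDICT (by name: the statement is the Claim_ definition above) =====
theorem token_in_line_spec : Claim_equal_token_in_line := by
  intro t seq lens _
  unfold Spec_token_in_line
  simp only [token_in_line, token_in_line_alt, buildEndsB_eq]
  rw [hits_eq t lens]
  cases hfil : (List.range lens.length).filter
      (fun k => decide ((lens.take k).sum ≤ t ∧ t < (lens.take (k + 1)).sum)) with
  | nil =>
    rw [if_pos (by simp)]
    refine loopA_none' t seq lens 0 0 (fun j hj hc => ?_)
    have := List.filter_eq_nil_iff.mp hfil j (List.mem_range.mpr hj)
    simp only [decide_eq_true_eq] at this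
    exact this ⟨by omega, by omega⟩
  | cons k0 rest =>
    have hk0mem : k0 ∈ (List.range lens.length).filter
        (fun k => decide ((lens.take k).sum ≤ t ∧ t < (lens.take (k + 1)).sum)) := by
      rw [hfil]; exact List.mem_cons_self ..
    have hk0n : k0 < lens.length := List.mem_range.mp (List.mem_of_mem_filter hk0mem)
    have hk0Q : (lens.take k0).sum ≤ t ∧ t < (lens.take (k0 + 1)).sum := by
      have := List.of_mem_filter hk0mem
      simpa using this
    have hpw : (k0 :: rest).Pairwise (· < ·) := by
      rw [← hfil]
      exact List.Pairwise.filter _ (List.pairwise_lt_range)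
    have hrest : ∀ j ∈ rest, k0 < j := (List.pairwise_cons.mp hpw).1
    have hmiss : ∀ j : Nat, j < k0 → ¬((lens.take j).sum ≤ t ∧ t < (lens.take (j + 1)).sum) := by
      intro j hj hc
      have hjmem : j ∈ (List.range lens.length).filter
          (fun k => decide ((lens.take k).sum ≤ t ∧ t < (lens.take (k + 1)).sum)) := by
        exact List.mem_filter.mpr ⟨List.mem_range.mpr (by omega), by simpa using hc⟩
      rw [hfil] at hjmem
      rcases List.mem_cons.mp hjmem with h | h
      · omega
      · exact absurd (hrest j h) (by omega)
    rw [if_neg (by simp)]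
    have hmin : (PySem.List.min? ((k0 :: rest).map (fun (k : Nat) => (k : Int))) (fun x => x)).getD 0
        = (k0 : Int) := by
      rw [List.map_cons, PySem.List.min?_id_cons]
      rw [foldl_min_of_le _ _ (fun y hy => by
        obtain ⟨j, hj, rfl⟩ := List.mem_map.mp hy
        exact_mod_cast le_of_lt (hrest j hj))]
      rfl
    rw [List.map_cons] at hmin ⊢
    rw [hmin]
    simp only [PySem.List.pyGetD_natCast]
    rw [PySem.List.slice_to_neg_one]
    rw [starts_getD lens k0 hk0n, pfxL_getD lens 0 k0 hk0n]
    rw [loopA_hit' t seq lens 0 0 k0 hk0n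
      (fun j hj hc => hmiss j hj ⟨by omega, by omega⟩) (by omega) (by omega)]
    norm_num
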